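-- pv_equiv track=rewrite | github.com/Arsen1302/Code-copy-detector | TestData/solutions/problem_1703_4_1.py | solution_1703_4_1
-- ===== SOURCE A (Python) =====
-- from typing import List
--
-- def solution_1703_4_1(queries: List[str], dictionary: List[str]) -> List[str]:
--
--     def solution_1703_4_2(word1, word2):
--         count = 0
--
--         for a, b in zip(word1, word2):
--             if a != b:
--                 count += 1
--
--         return count
--
--     res = []
--     for word in queries:
--         for item in dictionary:
--             x = solution_1703_4_2(word, item)
--             if x <= 2:
--                 res.append(word)
--                 break
--     return res
-- ===== SOURCE B (Python) =====
-- from typing import List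
--
-- def solution_1703_4_1(queries: List[str], dictionary: List[str]) -> List[str]:
--     # Loop interchange with a shrinking worklist: sweep the dictionary once; each
--     # sweep tests only the still-unmatched queries (early-exit budget-2 mismatch
--     # test) and drops the matched ones; stop when none remain.
--     def close(w, d):
--         budget = 2
--         for a, b in zip(w, d):
--             if a != b:
--                 if budget == 0:
--                     return False
--                 budget -= 1
--         return True
--
--     pending = list(enumerate(queries))
--     matched = set()
--     for item in dictionary:
--         if not pending:
--             break
--         still = []
--         for i, w in pending:
--             if close(w, item):
--                 matched.add(i)
--             else:
--                 still.append((i, w))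
--         pending = still
--     return [w for i, w in enumerate(queries) if i in matched]
-- ===== Notes on version B (the rewrite author's own statement) =====
-- stated objective: alternative
-- what changed: Loop interchange with a shrinking worklist: instead of scanning the dictionary per query with a full Hamming count and break, B sweeps the dictionary once, testing only the still-unmatched queries with an early-exit budget-2 mismatch test, dropping matched ones and stopping when none remain, then emits queries whose index was matched.
import Mathlib
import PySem

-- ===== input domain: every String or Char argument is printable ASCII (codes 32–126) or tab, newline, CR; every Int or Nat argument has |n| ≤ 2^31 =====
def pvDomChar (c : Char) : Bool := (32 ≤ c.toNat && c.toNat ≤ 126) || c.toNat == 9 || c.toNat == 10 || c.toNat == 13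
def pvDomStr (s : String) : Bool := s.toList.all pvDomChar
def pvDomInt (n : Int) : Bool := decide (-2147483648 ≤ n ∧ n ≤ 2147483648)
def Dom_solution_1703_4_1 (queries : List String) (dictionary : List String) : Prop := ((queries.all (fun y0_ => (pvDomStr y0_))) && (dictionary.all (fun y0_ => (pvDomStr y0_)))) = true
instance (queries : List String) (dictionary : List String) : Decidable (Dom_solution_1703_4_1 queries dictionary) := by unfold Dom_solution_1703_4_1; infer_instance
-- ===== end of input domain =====

-- B interchanges the loops: one sweep over the dictionary against a shrinking worklist of
-- still-unmatched (index, query) pairs, with an early-exit budget-2 mismatch test; alternative, not faster.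

-- ===== PORT A =====
-- helper solution_1703_4_2: count mismatches over zip(word1, word2)
def pvHamA (w1 w2 : List Char) : Int :=
  (w1.zip w2).foldl (fun count p => if p.1 ≠ p.2 then count + 1 else count) 0

-- inner 'for item in dictionary: … break' — returns true on the first item with x ≤ 2
def pvInnerA (word : String) : List String → Bool
  | [] => false
  | item :: rest =>
    if pvHamA word.toList item.toList ≤ 2 then true else pvInnerA word rest

def solution_1703_4_1 (queries : List String) (dictionary : List String) : List String :=
  queries.foldl (fun res word => if pvInnerA word dictionary then res ++ [word] else res) []

-- ===== PORT B =====
-- early-exit 'close': within `budget` remaining mismatches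
def pvCloseB : List Char → List Char → Nat → Bool
  | [], _, _ => true
  | _ :: _, [], _ => true
  | a :: as, b :: bs, budget =>
    if a ≠ b then
      match budget with
      | 0 => false
      | budget + 1 => pvCloseB as bs budget
    else pvCloseB as bs budget

def solution_1703_4_1_alt (queries : List String) (dictionary : List String) : List String :=
  let st := dictionary.foldl
    (fun (st : List (Int × String) × PySem.Set Int) item =>
      if st.1.isEmpty then st   -- 'if not pending: break'
      else st.1.foldl
        (fun acc iw =>
          if pvCloseB iw.2.toList item.toList 2 then (acc.1, PySem.Set.add acc.2 iw.1)
          else (acc.1 ++ [iw], acc.2))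
        ([], st.2))
    (PySem.List.enumerate queries 0, (PySem.Set.empty : PySem.Set Int))
  ((PySem.List.enumerate queries 0).filter (fun iw => PySem.Set.contains st.2 iw.1)).map (fun iw => iw.2)

-- ===== PRECONDITION & SPEC =====
def Spec_solution_1703_4_1 (queries : List String) (dictionary : List String) (out : List String) : Prop := out = solution_1703_4_1_alt queries dictionary
instance (queries : List String) (dictionary : List String) (out : List String) : Decidable (Spec_solution_1703_4_1 queries dictionary out) := by unfold Spec_solution_1703_4_1; infer_instance

-- ===== CLAIM (what is proved, stated in full; the proofs are below) =====
def Claim_equal_solution_1703_4_1 : Prop := ∀ (queries : List String) (dictionary : List String), Dom_solution_1703_4_1 queries dictionary → Spec_solution_1703_4_1 queries dictionary (solution_1703_4_1 queries dictionary)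

-- ===== LEMMAS AND PROOFS =====

-- accumulator shift for the mismatch count
theorem pvHamA_acc (l : List (Char × Char)) (c : Int) :
    l.foldl (fun count p => if p.1 ≠ p.2 then count + 1 else count) c
      = c + l.foldl (fun count p => if p.1 ≠ p.2 then count + 1 else count) 0 := by
  induction l generalizing c with
  | nil => simp
  | cons p t ih =>
    simp only [List.foldl_cons]
    rw [ih, ih (if (p.1 ≠ p.2) then (0:Int) + 1 else 0)]
    split_ifs <;> ring

-- the mismatch count is nonnegative
theorem pvHamA_nonneg_acc (l : List (Char × Char)) :
    ∀ c : Int, 0 ≤ c → 0 ≤ l.foldl (fun count p => if p.1 ≠ p.2 then count + 1 else count) c := by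
  induction l with
  | nil => intro c hc; simpa using hc
  | cons p t ih =>
    intro c hc
    simp only [List.foldl_cons]
    apply ih
    split_ifs <;> omega

theorem pvHamA_nonneg (l : List (Char × Char)) :
    (0 : Int) ≤ l.foldl (fun count p => if p.1 ≠ p.2 then count + 1 else count) (0 : Int) :=
  pvHamA_nonneg_acc l 0 le_rfl

-- the early-exit test equals 'mismatch count ≤ budget'
theorem pvCloseB_eq (xs ys : List Char) (k : Nat) :
    pvCloseB xs ys k = decide (pvHamA xs ys ≤ (k : Int)) := by
  induction xs generalizing ys k with
  | nil => simp [pvCloseB, pvHamA]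
  | cons a as ih =>
    cases ys with
    | nil => simp [pvCloseB, pvHamA]
    | cons b bs =>
      by_cases h : a = b
      · have h1 : pvCloseB (a :: as) (b :: bs) k = pvCloseB as bs k := by
          simp [pvCloseB, h]
        have h2 : pvHamA (a :: as) (b :: bs) = pvHamA as bs := by
          simp [pvHamA, h]
        rw [h1, h2, ih]
      · have h1 : pvHamA (a :: as) (b :: bs) = 1 + pvHamA as bs := by
          simp only [pvHamA, List.zip_cons_cons, List.foldl_cons]
          rw [if_pos (by exact h), pvHamA_acc]
          omega
        cases k with
        | zero =>
          have h0 : pvCloseB (a :: as) (b :: bs) 0 = false := by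
            simp [pvCloseB, h]
          have hn := pvHamA_nonneg (as.zip bs)
          rw [h0, h1, eq_comm, decide_eq_false_iff_not]
          simp only [pvHamA] at hn ⊢
          omega
        | succ k' =>
          have h0 : pvCloseB (a :: as) (b :: bs) (k' + 1) = pvCloseB as bs k' := by
            simp [pvCloseB, h]
          rw [h0, h1, ih]
          simp only [decide_eq_decide]
          push_cast
          omega

-- inner break-loop = any
theorem pvInnerA_eq_any (word : String) (l : List String) :
    pvInnerA word l = l.any (fun item => pvCloseB word.toList item.toList 2) := by
  induction l with
  | nil => simp [pvInnerA]
  | cons d t ih =>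
    simp only [pvInnerA, List.any_cons, pvCloseB_eq]
    by_cases h : pvHamA word.toList d.toList ≤ 2 <;> simp [h, ih, pvCloseB_eq]

-- the inner sweep over the worklist: matched indices are added, the rest survive in order
theorem pvStep1_spec (d : String) (p : List (Int × String)) :
    ∀ (l : List (Int × String)) (m : PySem.Set Int),
      p.foldl
        (fun acc iw =>
          if pvCloseB iw.2.toList d.toList 2 then (acc.1, PySem.Set.add acc.2 iw.1)
          else (acc.1 ++ [iw], acc.2))
        (l, m)
      = (l ++ p.filter (fun iw => !pvCloseB iw.2.toList d.toList 2),
         ((p.filter (fun iw => pvCloseB iw.2.toList d.toList 2)).map (fun iw => iw.1)).foldl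
           PySem.Set.add m) := by
  induction p with
  | nil => intro l m; simp
  | cons iw t ih =>
    intro l m
    by_cases h : pvCloseB iw.2.toList d.toList 2 = true
    · simp [List.foldl_cons, h, ih]
    · simp [List.foldl_cons, h, ih]

-- the outer sweep: worklist stays 'unmatched so far', the set collects exactly the matched indices
theorem pvOuter (P : List (Int × String)) (ds : List String) :
    ∀ (f : String → Bool) (m : PySem.Set Int),
      (∀ j : Int, j ∈ m ↔ ∃ iw ∈ P, iw.1 = j ∧ f iw.2 = true) →
      (ds.foldl
        (fun (st : List (Int × String) × PySem.Set Int) item =>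
          if st.1.isEmpty then st
          else st.1.foldl
            (fun acc iw =>
              if pvCloseB iw.2.toList item.toList 2 then (acc.1, PySem.Set.add acc.2 iw.1)
              else (acc.1 ++ [iw], acc.2))
            ([], st.2))
        (P.filter (fun iw => !f iw.2), m)).1
        = P.filter (fun iw => !(f iw.2 || ds.any (fun x => pvCloseB iw.2.toList x.toList 2)))
      ∧ ∀ j : Int,
          (j ∈ (ds.foldl
            (fun (st : List (Int × String) × PySem.Set Int) item =>
              if st.1.isEmpty then st
              else st.1.foldl
                (fun acc iw =>
                  if pvCloseB iw.2.toList item.toList 2 then (acc.1, PySem.Set.add acc.2 iw.1)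
                  else (acc.1 ++ [iw], acc.2))
                ([], st.2))
            (P.filter (fun iw => !f iw.2), m)).2
          ↔ ∃ iw ∈ P, iw.1 = j ∧ (f iw.2 || ds.any (fun x => pvCloseB iw.2.toList x.toList 2)) = true) := by
  induction ds with
  | nil =>
    intro f m hm
    constructor
    · simp
    · intro j; simpa using hm j
  | cons d t ih =>
    intro f m hm
    by_cases hemp : P.filter (fun iw => !f iw.2) = []
    · -- worklist already empty: the 'break' branch; every P-element is already matched by f
      have hall : ∀ iw ∈ P, f iw.2 = true := by
        intro iw hiw
        have := List.filter_eq_nil_iff.mp hemp iw hiw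
        simpa using this
      have hfilt : P.filter (fun iw => !(f iw.2 || pvCloseB iw.2.toList d.toList 2)) = [] := by
        apply List.filter_eq_nil_iff.mpr
        intro iw hiw
        simp [hall iw hiw]
      have hm' : ∀ j : Int, j ∈ m ↔ ∃ iw ∈ P, iw.1 = j ∧
          ((fun w => f w || pvCloseB w.toList d.toList 2) iw.2) = true := by
        intro j
        rw [hm j]
        constructor
        · rintro ⟨iw, hiw, h1, h2⟩; exact ⟨iw, hiw, h1, by simp [h2]⟩
        · rintro ⟨iw, hiw, h1, _⟩; exact ⟨iw, hiw, h1, hall iw hiw⟩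
      have hthis := ih (fun w => f w || pvCloseB w.toList d.toList 2) m hm'
      simp only at hthis
      rw [hfilt] at hthis
      rw [hemp]
      simp only [List.foldl_cons, List.isEmpty_nil, if_true]
      refine ⟨?_, ?_⟩
      · rw [hthis.1]
        apply List.filter_congr
        intro iw _
        simp [List.any_cons, Bool.or_assoc]
      · intro j
        rw [hthis.2 j]
        constructor
        · rintro ⟨iw, hiw, h1, h2⟩
          exact ⟨iw, hiw, h1, by simpa [List.any_cons, Bool.or_assoc] using h2⟩
        · rintro ⟨iw, hiw, h1, h2⟩
          exact ⟨iw, hiw, h1, by simpa [List.any_cons, Bool.or_assoc] using h2⟩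
    · -- real sweep over the worklist
      have hne : (P.filter (fun iw => !f iw.2)).isEmpty = false := by
        simpa [List.isEmpty_iff] using hemp
      have hpend : ((P.filter (fun iw => !f iw.2)).filter
            (fun iw => !pvCloseB iw.2.toList d.toList 2))
          = P.filter (fun iw => !(f iw.2 || pvCloseB iw.2.toList d.toList 2)) := by
        rw [List.filter_filter]
        apply List.filter_congr
        intro iw _
        cases hf : f iw.2 <;> cases hc : pvCloseB iw.2.toList d.toList 2 <;> simp_all
      have hm' : ∀ j : Int,
          (j ∈ (((P.filter (fun iw => !f iw.2)).filter
              (fun iw => pvCloseB iw.2.toList d.toList 2)).map (fun iw => iw.1)).foldl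
              PySem.Set.add m
          ↔ ∃ iw ∈ P, iw.1 = j ∧
              ((fun w => f w || pvCloseB w.toList d.toList 2) iw.2) = true) := by
        intro j
        have hmem : j ∈ (((P.filter (fun iw => !f iw.2)).filter
              (fun iw => pvCloseB iw.2.toList d.toList 2)).map (fun iw => iw.1)).foldl
              (fun s b => PySem.Set.add s (id b)) m
            ↔ j ∈ m ∨ ∃ b ∈ ((P.filter (fun iw => !f iw.2)).filter
              (fun iw => pvCloseB iw.2.toList d.toList 2)).map (fun iw => iw.1), j = id b :=
          PySem.Set.mem_foldl_add _ _ _ _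
        simp only [id] at hmem
        rw [hmem, hm j]
        constructor
        · rintro (⟨iw, hiw, h1, h2⟩ | ⟨b, hb, rfl⟩)
          · exact ⟨iw, hiw, h1, by simp [h2]⟩
          · rcases List.mem_map.mp hb with ⟨iw, hiw, rfl⟩
            rcases List.mem_filter.mp hiw with ⟨hiw2, hcl⟩
            rcases List.mem_filter.mp hiw2 with ⟨hiwP, _⟩
            exact ⟨iw, hiwP, rfl, by simp [hcl]⟩
        · rintro ⟨iw, hiw, h1, h2⟩
          cases hf : f iw.2 with
          | true => exact Or.inl ⟨iw, hiw, h1, hf⟩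
          | false =>
            have hcl : pvCloseB iw.2.toList d.toList 2 = true := by
              simpa [hf] using h2
            refine Or.inr ⟨iw.1, ?_, h1.symm⟩
            exact List.mem_map.mpr ⟨iw,
              List.mem_filter.mpr ⟨List.mem_filter.mpr ⟨hiw, by simp [hf]⟩, hcl⟩, rfl⟩
      have hthis := ih (fun w => f w || pvCloseB w.toList d.toList 2) _ hm'
      simp only at hthis
      simp only [List.foldl_cons, hne, Bool.false_eq_true, if_false]
      rw [pvStep1_spec d (P.filter (fun iw => !f iw.2)) [] m, List.nil_append, hpend]
      refine ⟨?_, ?_⟩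
      · rw [hthis.1]
        apply List.filter_congr
        intro iw _
        simp [List.any_cons, Bool.or_assoc]
      · intro j
        rw [hthis.2 j]
        constructor
        · rintro ⟨iw, hiw, h1, h2⟩
          exact ⟨iw, hiw, h1, by simpa [List.any_cons, Bool.or_assoc] using h2⟩
        · rintro ⟨iw, hiw, h1, h2⟩
          exact ⟨iw, hiw, h1, by simpa [List.any_cons, Bool.or_assoc] using h2⟩

-- distinct first components of an enumerate-style list
theorem pvFstInj (P : List (Int × String)) :
    P.Pairwise (fun p q => p.1 < q.1) → ∀ x ∈ P, ∀ y ∈ P, x.1 = y.1 → x = y := by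
  induction P with
  | nil => intro _ x hx; cases hx
  | cons a t ih =>
    intro hp x hx y hy hxy
    rcases List.pairwise_cons.mp hp with ⟨ha, ht⟩
    rcases List.mem_cons.mp hx with hxa | hxt
    · rcases List.mem_cons.mp hy with hya | hyt
      · rw [hxa, hya]
      · exfalso; have h2 := ha y hyt; rw [hxa] at hxy; omega
    · rcases List.mem_cons.mp hy with hya | hyt
      · exfalso; have h2 := ha x hxt; rw [hya] at hxy; omega
      · exact ih ht x hxt y hyt hxy

-- filtering an enumeration on the entry and projecting = filtering the list
theorem pvEnumFilterMap (l : List String) :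
    ∀ (s : Int) (g : String → Bool),
      ((PySem.List.enumerate l s).filter (fun iw => g iw.2)).map (fun iw => iw.2)
        = l.filter g := by
  induction l with
  | nil => intro s g; simp
  | cons w t ih =>
    intro s g
    rw [PySem.List.enumerate_cons]
    cases hg : g w <;> simp [hg, ih]

-- assembling the output from any set with the matched-index membership property
theorem pvAssemble (queries dictionary : List String) (S : PySem.Set Int)
    (hS : ∀ j : Int, j ∈ S ↔ ∃ iw ∈ PySem.List.enumerate queries 0, iw.1 = j ∧
        (dictionary.any (fun x => pvCloseB iw.2.toList x.toList 2)) = true) :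
    ((PySem.List.enumerate queries 0).filter (fun iw => PySem.Set.contains S iw.1)).map (fun iw => iw.2)
      = queries.filter (fun w => dictionary.any (fun x => pvCloseB w.toList x.toList 2)) := by
  rw [← pvEnumFilterMap queries 0 (fun w => dictionary.any (fun x => pvCloseB w.toList x.toList 2))]
  have hpred : (PySem.List.enumerate queries 0).filter (fun iw => PySem.Set.contains S iw.1)
      = (PySem.List.enumerate queries 0).filter
          (fun iw => dictionary.any (fun x => pvCloseB iw.2.toList x.toList 2)) := by
    apply List.filter_congr
    intro iw hiw
    cases hany : dictionary.any (fun x => pvCloseB iw.2.toList x.toList 2) with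
    | true =>
      exact (PySem.Set.contains_iff _ _).mpr ((hS iw.1).mpr ⟨iw, hiw, rfl, hany⟩)
    | false =>
      apply Bool.not_eq_true _ |>.mp
      intro hcon
      rcases (hS iw.1).mp ((PySem.Set.contains_iff _ _).mp hcon) with ⟨iw', hiw', h1, h2⟩
      have heq : iw' = iw :=
        pvFstInj _ (PySem.List.pairwise_lt_enumerate queries 0) iw' hiw' iw hiw h1
      rw [heq] at h2
      exact absurd h2 (by simp [hany])
  rw [hpred]

-- ===== VERDICT (by name: the statement is the Claim_ definition above) =====
theorem solution_1703_4_1_spec : Claim_equal_solution_1703_4_1 := by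
  intro queries dictionary _
  unfold Spec_solution_1703_4_1
  simp only [solution_1703_4_1, solution_1703_4_1_alt]
  rw [PySem.List.foldl_append_if_eq_filter, List.nil_append]
  have h0 : ∀ j : Int, j ∈ (PySem.Set.empty : PySem.Set Int) ↔
      ∃ iw ∈ PySem.List.enumerate queries 0, iw.1 = j ∧ (fun (_ : String) => false) iw.2 = true := by
    intro j
    constructor
    · intro h; cases h
    · rintro ⟨iw, _, _, h⟩; cases h
  have hout := pvOuter (PySem.List.enumerate queries 0) dictionary (fun _ => false) PySem.Set.empty h0
  simp only [Bool.not_false, List.filter_true, Bool.false_or] at hout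
  rw [pvAssemble queries dictionary _ hout.2]
  apply List.filter_congr
  intro w _
  rw [pvInnerA_eq_any]
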